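-- pv_equiv track=rewrite | github.com/WarmingUp-CodingTest/codingtest-python | noeyxos/250425/12886_gold4.py | move_equals
-- ===== SOURCE A (Python) =====
-- from collections import deque
--
-- def move_equals(a, b, c):
--     total = a + b + c
--     if total % 3 != 0:
--         return 0
--
--     queue = deque()
--     visited = set()
--
--     initial = tuple(sorted((a, b, c)))
--     queue.append(initial)
--     visited.add(initial)
--
--     while queue:
--         x, y, z = queue.popleft()
--
--         if x == y == z:
--             return 1
--
--         for i, j in [(x, y), (x, z), (y, z)]:
--             if i != j:
--                 small_group = min(i, j)
--                 large_group = max(i, j)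
--
--                 new_small = small_group * 2
--                 new_large = large_group - small_group
--                 remain = total - new_small - new_large
--
--                 new_state = tuple(sorted((new_small, new_large, remain)))
--
--                 if new_state not in visited:
--                     visited.add(new_state)
--                     queue.append(new_state)
--
--     return 0
-- ===== SOURCE B (Python) =====
-- def move_equals(a, b, c):
--     # Backward search: instead of running the doubling moves forward from (a, b, c),
--     # walk the INVERSE moves (halve an even pile and merge the half back into another)
--     # starting from the equal target, and answer whether the initial triple is an ancestor.
--     total = a + b + c
--     if total % 3 != 0:
--         return 0
--     initial = tuple(sorted((a, b, c)))
--     t = total // 3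
--     target = (t, t, t)
--     seen = {target}
--     stack = [target]
--     while stack:
--         state = stack.pop()
--         if state == initial:
--             return 1
--         for k in range(3):
--             p = state[k]
--             if p % 2 == 0:
--                 half = p // 2
--                 for l in range(3):
--                     if l != k and state[l] != 0:
--                         r = state[3 - k - l]
--                         prev = tuple(sorted((half, state[l] + half, r)))
--                         if prev not in seen:
--                             seen.add(prev)
--                             stack.append(prev)
--     return 0
-- ===== Notes on version B (the rewrite author's own statement) =====
-- stated objective: alternative
-- what changed: B searches the state graph BACKWARD: instead of A's forward BFS applying the doubling moves from the initial triple until an equal state is dequeued, B applies the inverse moves (halve an even pile and merge the half back into another nonzero pile) starting from the equal target triple (total//3 each) and answers whether the initial sorted triple turns up as an ancestor; Pre_ excludes inputs with a negative pile where total%3==0 and the piles are not already equal, on which A's BFS diverges.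
import Mathlib
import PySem

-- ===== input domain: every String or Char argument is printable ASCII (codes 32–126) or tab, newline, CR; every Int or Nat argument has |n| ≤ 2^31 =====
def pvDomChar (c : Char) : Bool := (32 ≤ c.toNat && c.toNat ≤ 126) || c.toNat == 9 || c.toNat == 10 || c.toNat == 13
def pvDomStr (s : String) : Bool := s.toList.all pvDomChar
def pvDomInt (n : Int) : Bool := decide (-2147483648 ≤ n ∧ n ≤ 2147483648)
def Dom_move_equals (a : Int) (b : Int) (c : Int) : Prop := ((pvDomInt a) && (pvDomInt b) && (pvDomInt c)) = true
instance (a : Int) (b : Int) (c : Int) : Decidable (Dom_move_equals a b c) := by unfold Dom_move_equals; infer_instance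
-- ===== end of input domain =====

-- B replaces A's forward BFS of doubling moves by a BACKWARD search: it walks the inverse
-- moves (halve an even pile, merge the half back into another pile) from the equal target
-- triple and answers whether the initial triple is an ancestor (objective: alternative).
-- In both ports Python's hash set 'visited'/'seen' is rendered as Std.HashSet (constant-time
-- membership, as in CPython; only membership and size are used, never iteration order); A's
-- deque is rendered as the classic two-list FIFO queue and B's list-as-stack as a Lean list
-- with push = cons and pop = head, which is exactly Python's append/pop() LIFO order.

-- ===== PORT A =====
-- helper shared by both ports: Python's tuple(sorted((x, y, z)))
def sort3 (a b c : Int) : Int × Int × Int :=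
  match PySem.List.sorted [a, b, c] (fun x => x) false with
  | [x, y, z] => (x, y, z)
  | _ => (0, 0, 0)

-- A's new sorted state from doubling the smaller of the pair (i, j)
def pvMove (total i j : Int) : Int × Int × Int :=
  let small := min i j
  let newSmall := small * 2
  let newLarge := max i j - small
  sort3 newSmall newLarge (total - newSmall - newLarge)

-- the states produced by A's 'for i, j in [(x,y),(x,z),(y,z)]' loop
def pvNxt (total : Int) (s : Int × Int × Int) : List (Int × Int × Int) :=
  (if s.1 ≠ s.2.1 then [pvMove total s.1 s.2.1] else []) ++
  (if s.1 ≠ s.2.2 then [pvMove total s.1 s.2.2] else []) ++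
  (if s.2.1 ≠ s.2.2 then [pvMove total s.2.1 s.2.2] else [])

-- 'if <state> not in <set>: <set>.add(<state>); <worklist>.append(<state>)'
-- (this line occurs in both Pythons; the worklist is A's queue back / B's stack)
def pvAdd (p : List (Int × Int × Int) × Std.HashSet (Int × Int × Int))
    (ns : Int × Int × Int) : List (Int × Int × Int) × Std.HashSet (Int × Int × Int) :=
  if p.2.contains ns then p else (ns :: p.1, p.2.insert ns)

-- A's 'while queue' loop; the fuel only bounds the number of iterations (pvBfs_main below
-- proves it is never exhausted on inputs satisfying Pre_)
def pvBfs (total : Int) :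
    Nat → List (Int × Int × Int) → List (Int × Int × Int) →
    Std.HashSet (Int × Int × Int) → Int
  | 0, _, _, _ => 0
  | _ + 1, [], [], _ => 0
  | f + 1, [], back, vis => pvBfs total f back.reverse [] vis
  | f + 1, s :: front, back, vis =>
    if s.1 = s.2.1 ∧ s.2.1 = s.2.2 then 1
    else
      let p := (pvNxt total s).foldl pvAdd (back, vis)
      pvBfs total f front p.1 p.2

def move_equals (a : Int) (b : Int) (c : Int) : Int :=
  let total := a + b + c
  if PySem.Int.mod total 3 ≠ 0 then 0
  else
    let init := sort3 a b c
    pvBfs total (2 * ((total.toNat + 1) ^ 2) + 2) [init] []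
      ((∅ : Std.HashSet (Int × Int × Int)).insert init)

-- ===== PORT B =====
-- B's predecessor generation: 'for k in range(3): if state[k] % 2 == 0: for l != k with
-- state[l] != 0: sorted((state[k]//2, state[l] + state[k]//2, state[rest]))', in Python's
-- (k asc, l asc) order
def pvHalfMoves (s : Int × Int × Int) : List (Int × Int × Int) :=
  (if PySem.Int.mod s.1 2 = 0 then
    (if s.2.1 ≠ 0 then
      [sort3 (PySem.Int.floordiv s.1 2) (s.2.1 + PySem.Int.floordiv s.1 2) s.2.2] else []) ++
    (if s.2.2 ≠ 0 then
      [sort3 (PySem.Int.floordiv s.1 2) (s.2.2 + PySem.Int.floordiv s.1 2) s.2.1] else [])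
   else []) ++
  (if PySem.Int.mod s.2.1 2 = 0 then
    (if s.1 ≠ 0 then
      [sort3 (PySem.Int.floordiv s.2.1 2) (s.1 + PySem.Int.floordiv s.2.1 2) s.2.2] else []) ++
    (if s.2.2 ≠ 0 then
      [sort3 (PySem.Int.floordiv s.2.1 2) (s.2.2 + PySem.Int.floordiv s.2.1 2) s.1] else [])
   else []) ++
  (if PySem.Int.mod s.2.2 2 = 0 then
    (if s.1 ≠ 0 then
      [sort3 (PySem.Int.floordiv s.2.2 2) (s.1 + PySem.Int.floordiv s.2.2 2) s.2.1] else []) ++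
    (if s.2.1 ≠ 0 then
      [sort3 (PySem.Int.floordiv s.2.2 2) (s.2.1 + PySem.Int.floordiv s.2.2 2) s.1] else [])
   else [])

-- B's 'while stack' loop (pop the most recently pushed state first, as list.pop() does)
def pvBack (initial : Int × Int × Int) :
    Nat → List (Int × Int × Int) → Std.HashSet (Int × Int × Int) → Int
  | 0, _, _ => 0
  | _ + 1, [], _ => 0
  | f + 1, s :: rest, seen =>
    if s = initial then 1
    else
      let p := (pvHalfMoves s).foldl pvAdd (rest, seen)
      pvBack initial f p.1 p.2

def move_equals_alt (a : Int) (b : Int) (c : Int) : Int :=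
  let total := a + b + c
  if PySem.Int.mod total 3 ≠ 0 then 0
  else
    let initial := sort3 a b c
    let t := PySem.Int.floordiv total 3
    pvBack initial ((total.toNat + 1) ^ 2 + 2) [(t, t, t)]
      ((∅ : Std.HashSet (Int × Int × Int)).insert (t, t, t))

-- ===== PRECONDITION & SPEC =====
-- Pre_ excludes inputs having a negative pile with total % 3 == 0 and the piles not already all
-- equal: on those A's doubling moves generate an ever-growing state space and A's BFS diverges
-- (it returns nothing), so nothing is claimed there.
def Pre_move_equals (a : Int) (b : Int) (c : Int) : Prop :=
  PySem.Int.mod (a + b + c) 3 ≠ 0 ∨ (0 ≤ a ∧ 0 ≤ b ∧ 0 ≤ c) ∨ (a = b ∧ b = c)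
instance (a : Int) (b : Int) (c : Int) : Decidable (Pre_move_equals a b c) := by
  unfold Pre_move_equals; infer_instance

def pvWitness_move_equals : Int × Int × Int := (1, 2, 3)

def Spec_move_equals (a : Int) (b : Int) (c : Int) (out : Int) : Prop := out = move_equals_alt a b c
instance (a : Int) (b : Int) (c : Int) (out : Int) : Decidable (Spec_move_equals a b c out) := by
  unfold Spec_move_equals; infer_instance

-- ===== CLAIM (what is proved, stated in full; the proofs are below) =====
def Claim_equal_move_equals : Prop := ∀ (a : Int) (b : Int) (c : Int), Dom_move_equals a b c →
  Pre_move_equals a b c → Spec_move_equals a b c (move_equals a b c)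

-- ===== LEMMAS AND PROOFS =====

-- sorted ∧ nonnegative smallest component ∧ component sum = total
def pvOkay (total : Int) (s : Int × Int × Int) : Prop :=
  s.1 ≤ s.2.1 ∧ s.2.1 ≤ s.2.2 ∧ 0 ≤ s.1 ∧ s.1 + s.2.1 + s.2.2 = total

def pvReach (total : Int) (init s : Int × Int × Int) : Prop :=
  Relation.ReflTransGen (fun u t => t ∈ pvNxt total u) init s

-- backward reachability along B's inverse moves
def pvBReach (tgt s : Int × Int × Int) : Prop :=
  Relation.ReflTransGen (fun u t => t ∈ pvHalfMoves u) tgt s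

def pvIsEq (s : Int × Int × Int) : Prop := s.1 = s.2.1 ∧ s.2.1 = s.2.2

-- loop invariant of A's BFS (Q is the abstract queue front ++ back.reverse)
def pvInvA (total : Int) (init : Int × Int × Int)
    (Q : List (Int × Int × Int)) (v : Std.HashSet (Int × Int × Int)) : Prop :=
  init ∈ v ∧ (∀ s ∈ Q, s ∈ v) ∧ (∀ s ∈ v, pvReach total init s) ∧
  (∀ s ∈ v, pvOkay total s) ∧
  (∀ s ∈ v, s ∉ Q → ¬ pvIsEq s ∧ ∀ t ∈ pvNxt total s, t ∈ v)

-- loop invariant of B's backward search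
def pvInvB (total : Int) (tgt initial : Int × Int × Int)
    (stack : List (Int × Int × Int)) (seen : Std.HashSet (Int × Int × Int)) : Prop :=
  tgt ∈ seen ∧ (∀ s ∈ stack, s ∈ seen) ∧ (∀ s ∈ seen, pvBReach tgt s) ∧
  (∀ s ∈ seen, pvOkay total s) ∧
  (∀ s ∈ seen, s ∉ stack → s ≠ initial ∧ ∀ t ∈ pvHalfMoves s, t ∈ seen)

lemma hs_mem_insert (v : Std.HashSet (Int × Int × Int)) (x y : Int × Int × Int) :
    x ∈ v.insert y ↔ x = y ∨ x ∈ v := by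
  rw [Std.HashSet.mem_insert, beq_iff_eq, eq_comm]

lemma hs_nodup_toList (v : Std.HashSet (Int × Int × Int)) : v.toList.Nodup := by
  have := Std.HashSet.distinct_toList (m := v)
  exact this.imp (fun h => by simpa [beq_iff_eq] using h)

lemma sort3_spec (a b c : Int) :
    ∃ x y z, sort3 a b c = (x, y, z) ∧ x ≤ y ∧ y ≤ z ∧ [x, y, z].Perm [a, b, c] := by
  have hperm : (PySem.List.sorted [a, b, c] (fun x => x) false).Perm [a, b, c] :=
    PySem.List.sorted_perm _ _ _
  have hpw : (PySem.List.sorted [a, b, c] (fun x => x) false).Pairwise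
      (fun u v => (fun x => x) u ≤ (fun x => x) v) := PySem.List.sorted_pairwise _ _
  have hlen : (PySem.List.sorted [a, b, c] (fun x => x) false).length = 3 := by
    rw [hperm.length_eq]; rfl
  match hl : PySem.List.sorted [a, b, c] (fun x => x) false, hlen with
  | [x, y, z], _ =>
    rw [hl] at hperm hpw
    refine ⟨x, y, z, ?_, ?_, ?_, hperm⟩
    · simp [sort3, hl]
    · simp only [List.pairwise_cons] at hpw
      exact hpw.1 y (by simp)
    · simp only [List.pairwise_cons] at hpw
      exact hpw.2.1 z (by simp)

-- positional closed form of sort3: smallest, middle (via the sum), largest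
lemma sort3_closed (a b c : Int) :
    sort3 a b c = (min a (min b c), a + b + c - min a (min b c) - max a (max b c),
      max a (max b c)) := by
  obtain ⟨x, y, z, he, hxy, hyz, hperm⟩ := sort3_spec a b c
  have hsum : x + y + z = a + b + c := by
    have := hperm.sum_eq; simp [List.sum_cons] at this; omega
  have hx : x = a ∨ x = b ∨ x = c := by simpa using hperm.mem_iff.mp (List.mem_cons_self ..)
  have hy : y = a ∨ y = b ∨ y = c := by
    simpa using hperm.mem_iff.mp (by simp : y ∈ [x, y, z])
  have hz : z = a ∨ z = b ∨ z = c := by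
    simpa using hperm.mem_iff.mp (by simp : z ∈ [x, y, z])
  have ha : a = x ∨ a = y ∨ a = z := by
    simpa using hperm.symm.mem_iff.mp (by simp : a ∈ [a, b, c])
  have hb : b = x ∨ b = y ∨ b = z := by
    simpa using hperm.symm.mem_iff.mp (by simp : b ∈ [a, b, c])
  have hc : c = x ∨ c = y ∨ c = z := by
    simpa using hperm.symm.mem_iff.mp (by simp : c ∈ [a, b, c])
  rw [he]
  refine Prod.ext ?_ (Prod.ext ?_ ?_) <;> simp only [] <;> omega

lemma sort3_okay (total a b c : Int) (ha : 0 ≤ a) (hb : 0 ≤ b) (hc : 0 ≤ c)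
    (hsum : a + b + c = total) : pvOkay total (sort3 a b c) := by
  rw [sort3_closed]
  refine ⟨by simp only []; omega, by simp only []; omega, by simp only []; omega, by
    simp only []; omega⟩

lemma pvMove_okay (total i j k : Int) (hi : 0 ≤ i) (hj : 0 ≤ j) (hk : 0 ≤ k)
    (hsum : i + j + k = total) : pvOkay total (pvMove total i j) := by
  have hmm : min i j + max i j = i + j := min_add_max i j
  have h1 : 0 ≤ min i j := le_min hi hj
  have h2 : min i j ≤ max i j := min_le_max
  apply sort3_okay <;> omega

lemma pvNxt_okay (total : Int) (s : Int × Int × Int) (hs : pvOkay total s) :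
    ∀ t ∈ pvNxt total s, pvOkay total t := by
  obtain ⟨h12, h23, h1, hsum⟩ := hs
  intro t ht
  simp only [pvNxt, List.mem_append, List.mem_ite_nil_right, List.mem_singleton] at ht
  rcases ht with (⟨_, rfl⟩ | ⟨_, rfl⟩) | ⟨_, rfl⟩
  · exact pvMove_okay total s.1 s.2.1 s.2.2 (by omega) (by omega) (by omega) (by omega)
  · exact pvMove_okay total s.1 s.2.2 s.2.1 (by omega) (by omega) (by omega) (by omega)
  · exact pvMove_okay total s.2.1 s.2.2 s.1 (by omega) (by omega) (by omega) (by omega)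

lemma pvReach_okay (total : Int) (init s : Int × Int × Int) (h0 : pvOkay total init)
    (h : pvReach total init s) : pvOkay total s := by
  induction h with
  | refl => exact h0
  | tail _ hstep ih => exact pvNxt_okay total _ ih _ hstep

lemma reach_closed (total : Int) (init : Int × Int × Int) (Pm : Int × Int × Int → Prop)
    (hi : Pm init) (hcl : ∀ s, Pm s → ∀ t ∈ pvNxt total s, Pm t) :
    ∀ s, pvReach total init s → Pm s := by
  intro s h
  induction h with
  | refl => exact hi
  | tail _ hstep ih => exact hcl _ ih _ hstep

lemma breach_closed (tgt : Int × Int × Int) (Pm : Int × Int × Int → Prop)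
    (hi : Pm tgt) (hcl : ∀ s, Pm s → ∀ t ∈ pvHalfMoves s, Pm t) :
    ∀ s, pvBReach tgt s → Pm s := by
  intro s h
  induction h with
  | refl => exact hi
  | tail _ hstep ih => exact hcl _ ih _ hstep

-- membership in pvHalfMoves as a 6-way disjunction (one per Python (k, l) position pair)
lemma mem_pvHalfMoves (s u : Int × Int × Int) :
    u ∈ pvHalfMoves s ↔
    (PySem.Int.mod s.1 2 = 0 ∧ s.2.1 ≠ 0 ∧
      u = sort3 (PySem.Int.floordiv s.1 2) (s.2.1 + PySem.Int.floordiv s.1 2) s.2.2) ∨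
    (PySem.Int.mod s.1 2 = 0 ∧ s.2.2 ≠ 0 ∧
      u = sort3 (PySem.Int.floordiv s.1 2) (s.2.2 + PySem.Int.floordiv s.1 2) s.2.1) ∨
    (PySem.Int.mod s.2.1 2 = 0 ∧ s.1 ≠ 0 ∧
      u = sort3 (PySem.Int.floordiv s.2.1 2) (s.1 + PySem.Int.floordiv s.2.1 2) s.2.2) ∨
    (PySem.Int.mod s.2.1 2 = 0 ∧ s.2.2 ≠ 0 ∧
      u = sort3 (PySem.Int.floordiv s.2.1 2) (s.2.2 + PySem.Int.floordiv s.2.1 2) s.1) ∨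
    (PySem.Int.mod s.2.2 2 = 0 ∧ s.1 ≠ 0 ∧
      u = sort3 (PySem.Int.floordiv s.2.2 2) (s.1 + PySem.Int.floordiv s.2.2 2) s.2.1) ∨
    (PySem.Int.mod s.2.2 2 = 0 ∧ s.2.1 ≠ 0 ∧
      u = sort3 (PySem.Int.floordiv s.2.2 2) (s.2.1 + PySem.Int.floordiv s.2.2 2) s.1) := by
  simp only [pvHalfMoves, List.mem_append, List.mem_ite_nil_right, List.mem_singleton,
    and_or_left, or_assoc]

lemma mem_pvNxt (total : Int) (s t : Int × Int × Int) :
    t ∈ pvNxt total s ↔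
    (s.1 ≠ s.2.1 ∧ t = pvMove total s.1 s.2.1) ∨
    (s.1 ≠ s.2.2 ∧ t = pvMove total s.1 s.2.2) ∨
    (s.2.1 ≠ s.2.2 ∧ t = pvMove total s.2.1 s.2.2) := by
  simp only [pvNxt, List.mem_append, List.mem_ite_nil_right, List.mem_singleton, or_assoc]

lemma mod2_of_double (m : Int) : PySem.Int.mod (2 * m) 2 = 0 :=
  (PySem.Int.mod_eq_zero_iff_dvd _ _).mpr ⟨m, rfl⟩

lemma floordiv2_double (m : Int) : PySem.Int.floordiv (2 * m) 2 = m := by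
  rw [PySem.Int.floordiv_eq_ediv_of_pos (by norm_num)]
  exact Int.mul_ediv_cancel_left m (by norm_num)

lemma double_of_mod2 (p : Int) (h : PySem.Int.mod p 2 = 0) :
    p = 2 * PySem.Int.floordiv p 2 := by
  have := PySem.Int.floordiv_mul_add_mod p 2
  omega

lemma sort3_congr {a b c a' b' c' : Int} (h1 : a = a') (h2 : b = b') (h3 : c = c') :
    sort3 a b c = sort3 a' b' c' := by rw [h1, h2, h3]

lemma pvHalf_okay (total : Int) (s : Int × Int × Int) (hs : pvOkay total s) :
    ∀ u ∈ pvHalfMoves s, pvOkay total u := by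
  obtain ⟨h12, h23, h1, hsum⟩ := hs
  intro u hu
  rw [mem_pvHalfMoves] at hu
  rcases hu with ⟨hp, hq, rfl⟩ | ⟨hp, hq, rfl⟩ | ⟨hp, hq, rfl⟩ | ⟨hp, hq, rfl⟩ |
    ⟨hp, hq, rfl⟩ | ⟨hp, hq, rfl⟩ <;>
  · have hd := double_of_mod2 _ hp
    apply sort3_okay <;> omega

-- core: the state sort3 m M r (m < M) is generated by pvHalfMoves from its doubled image
lemma half_mem_core (m M r : Int) (hm : m < M) :
    sort3 m M r ∈ pvHalfMoves (sort3 (2 * m) (M - m) r) := by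
  rcases le_total (2 * m) (M - m) with h1 | h1 <;> rcases le_total (2 * m) r with h2 | h2 <;>
    rcases le_total (M - m) r with h3 | h3
  all_goals {
    first
    | (have ht : sort3 (2 * m) (M - m) r = (2 * m, M - m, r) := by
        rw [sort3_closed]; refine Prod.ext ?_ (Prod.ext ?_ ?_) <;> simp only [] <;> omega
       rw [ht, mem_pvHalfMoves]
       refine Or.inl ⟨mod2_of_double m, by simp only []; omega, ?_⟩
       simp only [floordiv2_double]
       exact (sort3_congr rfl (by omega) rfl).symm)
    | (have ht : sort3 (2 * m) (M - m) r = (2 * m, r, M - m) := by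
        rw [sort3_closed]; refine Prod.ext ?_ (Prod.ext ?_ ?_) <;> simp only [] <;> omega
       rw [ht, mem_pvHalfMoves]
       refine Or.inr (Or.inl ⟨mod2_of_double m, by simp only []; omega, ?_⟩)
       simp only [floordiv2_double]
       exact (sort3_congr rfl (by omega) rfl).symm)
    | (have ht : sort3 (2 * m) (M - m) r = (M - m, 2 * m, r) := by
        rw [sort3_closed]; refine Prod.ext ?_ (Prod.ext ?_ ?_) <;> simp only [] <;> omega
       rw [ht, mem_pvHalfMoves]
       refine Or.inr (Or.inr (Or.inl ⟨mod2_of_double m, by simp only []; omega, ?_⟩))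
       simp only [floordiv2_double]
       exact (sort3_congr rfl (by omega) rfl).symm)
    | (have ht : sort3 (2 * m) (M - m) r = (r, 2 * m, M - m) := by
        rw [sort3_closed]; refine Prod.ext ?_ (Prod.ext ?_ ?_) <;> simp only [] <;> omega
       rw [ht, mem_pvHalfMoves]
       refine Or.inr (Or.inr (Or.inr (Or.inl ⟨mod2_of_double m, by simp only []; omega, ?_⟩)))
       simp only [floordiv2_double]
       exact (sort3_congr rfl (by omega) rfl).symm)
    | (have ht : sort3 (2 * m) (M - m) r = (M - m, r, 2 * m) := by
        rw [sort3_closed]; refine Prod.ext ?_ (Prod.ext ?_ ?_) <;> simp only [] <;> omega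
       rw [ht, mem_pvHalfMoves]
       refine Or.inr (Or.inr (Or.inr (Or.inr (Or.inl ⟨mod2_of_double m, by simp only []; omega, ?_⟩))))
       simp only [floordiv2_double]
       exact (sort3_congr rfl (by omega) rfl).symm)
    | (have ht : sort3 (2 * m) (M - m) r = (r, M - m, 2 * m) := by
        rw [sort3_closed]; refine Prod.ext ?_ (Prod.ext ?_ ?_) <;> simp only [] <;> omega
       rw [ht, mem_pvHalfMoves]
       refine Or.inr (Or.inr (Or.inr (Or.inr (Or.inr ⟨mod2_of_double m, by simp only []; omega, ?_⟩))))
       simp only [floordiv2_double]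
       exact (sort3_congr rfl (by omega) rfl).symm) }

-- core: sort3 (2h) q r (q > 0) is a forward successor of sort3 h (q+h) r
lemma move_mem_core (total h q r : Int) (hq : 0 < q) (hsum : 2 * h + q + r = total) :
    sort3 (2 * h) q r ∈ pvNxt total (sort3 h (q + h) r) := by
  rcases le_total r h with h1 | h1 <;> rcases le_total r (q + h) with h2 | h2
  all_goals {
    first
    | (have hu : sort3 h (q + h) r = (r, h, q + h) := by
        rw [sort3_closed]; refine Prod.ext ?_ (Prod.ext ?_ ?_) <;> simp only [] <;> omega
       rw [hu, mem_pvNxt]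
       refine Or.inr (Or.inr ⟨by simp only []; omega, ?_⟩)
       simp only [pvMove, min_eq_left (by omega : h ≤ q + h),
         max_eq_right (by omega : h ≤ q + h)]
       exact (sort3_congr (by omega) (by omega) (by omega)).symm)
    | (have hu : sort3 h (q + h) r = (h, r, q + h) := by
        rw [sort3_closed]; refine Prod.ext ?_ (Prod.ext ?_ ?_) <;> simp only [] <;> omega
       rw [hu, mem_pvNxt]
       refine Or.inr (Or.inl ⟨by simp only []; omega, ?_⟩)
       simp only [pvMove, min_eq_left (by omega : h ≤ q + h),
         max_eq_right (by omega : h ≤ q + h)]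
       exact (sort3_congr (by omega) (by omega) (by omega)).symm)
    | (have hu : sort3 h (q + h) r = (h, q + h, r) := by
        rw [sort3_closed]; refine Prod.ext ?_ (Prod.ext ?_ ?_) <;> simp only [] <;> omega
       rw [hu, mem_pvNxt]
       refine Or.inl ⟨by simp only []; omega, ?_⟩
       simp only [pvMove, min_eq_left (by omega : h ≤ q + h),
         max_eq_right (by omega : h ≤ q + h)]
       exact (sort3_congr (by omega) (by omega) (by omega)).symm) }

-- forward step inverted: if t is a successor of the okay state s, then s is among the
-- halving predecessors of t
lemma step_fwd_bwd (total : Int) (s t : Int × Int × Int) (hs : pvOkay total s)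
    (ht : t ∈ pvNxt total s) : s ∈ pvHalfMoves t := by
  obtain ⟨s1, s2, s3⟩ := s
  obtain ⟨h12, h23, h1, hsum⟩ := hs
  simp only [] at h12 h23 h1 hsum
  rw [mem_pvNxt] at ht
  rcases ht with ⟨hne, rfl⟩ | ⟨hne, rfl⟩ | ⟨hne, rfl⟩ <;> simp only [] at hne
  · have hm : s1 < s2 := lt_of_le_of_ne h12 hne
    have he : pvMove total s1 s2 = sort3 (2 * s1) (s2 - s1) s3 := by
      simp only [pvMove, min_eq_left h12, max_eq_right h12]
      exact sort3_congr (by ring) rfl (by omega)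
    rw [he]
    have hself : sort3 s1 s2 s3 = (s1, s2, s3) := by
      rw [sort3_closed]; refine Prod.ext ?_ (Prod.ext ?_ ?_) <;> simp only [] <;> omega
    rw [← hself]
    exact half_mem_core s1 s2 s3 hm
  · have h13 : s1 ≤ s3 := le_trans h12 h23
    have hm : s1 < s3 := lt_of_le_of_ne h13 hne
    have he : pvMove total s1 s3 = sort3 (2 * s1) (s3 - s1) s2 := by
      simp only [pvMove, min_eq_left h13, max_eq_right h13]
      exact sort3_congr (by ring) rfl (by omega)
    rw [he]
    have hself : sort3 s1 s3 s2 = (s1, s2, s3) := by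
      rw [sort3_closed]; refine Prod.ext ?_ (Prod.ext ?_ ?_) <;> simp only [] <;> omega
    rw [← hself]
    exact half_mem_core s1 s3 s2 hm
  · have hm : s2 < s3 := lt_of_le_of_ne h23 hne
    have he : pvMove total s2 s3 = sort3 (2 * s2) (s3 - s2) s1 := by
      simp only [pvMove, min_eq_left h23, max_eq_right h23]
      exact sort3_congr (by ring) rfl (by omega)
    rw [he]
    have hself : sort3 s2 s3 s1 = (s1, s2, s3) := by
      rw [sort3_closed]; refine Prod.ext ?_ (Prod.ext ?_ ?_) <;> simp only [] <;> omega
    rw [← hself]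
    exact half_mem_core s2 s3 s1 hm

-- backward step inverted: every halving predecessor u of the okay state t has t among
-- its forward (doubling) successors
lemma step_bwd_fwd (total : Int) (t u : Int × Int × Int) (ht : pvOkay total t)
    (hu : u ∈ pvHalfMoves t) : t ∈ pvNxt total u := by
  obtain ⟨t1, t2, t3⟩ := t
  obtain ⟨h12, h23, h1, hsum⟩ := ht
  simp only [] at h12 h23 h1 hsum
  rw [mem_pvHalfMoves] at hu
  rcases hu with ⟨hp, hq, rfl⟩ | ⟨hp, hq, rfl⟩ | ⟨hp, hq, rfl⟩ | ⟨hp, hq, rfl⟩ |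
    ⟨hp, hq, rfl⟩ | ⟨hp, hq, rfl⟩ <;>
    simp only [] at hp hq ⊢ <;>
    [ (have hd := double_of_mod2 t1 hp
       have hteq : sort3 (2 * PySem.Int.floordiv t1 2) t2 t3 = (t1, t2, t3) := by
         rw [sort3_closed]; refine Prod.ext ?_ (Prod.ext ?_ ?_) <;> simp only [] <;> omega
       rw [← hteq]
       exact move_mem_core total _ t2 t3 (by omega) (by omega));
      (have hd := double_of_mod2 t1 hp
       have hteq : sort3 (2 * PySem.Int.floordiv t1 2) t3 t2 = (t1, t2, t3) := by
         rw [sort3_closed]; refine Prod.ext ?_ (Prod.ext ?_ ?_) <;> simp only [] <;> omega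
       rw [← hteq]
       exact move_mem_core total _ t3 t2 (by omega) (by omega));
      (have hd := double_of_mod2 t2 hp
       have hteq : sort3 (2 * PySem.Int.floordiv t2 2) t1 t3 = (t1, t2, t3) := by
         rw [sort3_closed]; refine Prod.ext ?_ (Prod.ext ?_ ?_) <;> simp only [] <;> omega
       rw [← hteq]
       exact move_mem_core total _ t1 t3 (by omega) (by omega));
      (have hd := double_of_mod2 t2 hp
       have hteq : sort3 (2 * PySem.Int.floordiv t2 2) t3 t1 = (t1, t2, t3) := by
         rw [sort3_closed]; refine Prod.ext ?_ (Prod.ext ?_ ?_) <;> simp only [] <;> omega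
       rw [← hteq]
       exact move_mem_core total _ t3 t1 (by omega) (by omega));
      (have hd := double_of_mod2 t3 hp
       have hteq : sort3 (2 * PySem.Int.floordiv t3 2) t1 t2 = (t1, t2, t3) := by
         rw [sort3_closed]; refine Prod.ext ?_ (Prod.ext ?_ ?_) <;> simp only [] <;> omega
       rw [← hteq]
       exact move_mem_core total _ t1 t2 (by omega) (by omega));
      (have hd := double_of_mod2 t3 hp
       have hteq : sort3 (2 * PySem.Int.floordiv t3 2) t2 t1 = (t1, t2, t3) := by
         rw [sort3_closed]; refine Prod.ext ?_ (Prod.ext ?_ ?_) <;> simp only [] <;> omega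
       rw [← hteq]
       exact move_mem_core total _ t2 t1 (by omega) (by omega))]

lemma foldl_pvAdd_spec (L : List (Int × Int × Int)) :
    ∀ (back : List (Int × Int × Int)) (v : Std.HashSet (Int × Int × Int)),
    ∃ (es : List (Int × Int × Int)) (v' : Std.HashSet (Int × Int × Int)),
      L.foldl pvAdd (back, v) = (es.reverse ++ back, v') ∧
      (∀ x, x ∈ v' ↔ x ∈ v ∨ x ∈ es) ∧ v'.size = v.size + es.length ∧ es.Nodup ∧
      (∀ x ∈ es, x ∈ L ∧ x ∉ v) ∧ (∀ t ∈ L, t ∈ v') := by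
  induction L with
  | nil =>
    intro back v
    exact ⟨[], v, by simp, by simp, by simp, by simp, by simp, by simp⟩
  | cons t L ih =>
    intro back v
    by_cases hm : t ∈ v
    · have hc : v.contains t = true := Std.HashSet.contains_iff_mem.mpr hm
      obtain ⟨es, v', heq, hmemiff, hsz, hnd, hmem, hall⟩ := ih back v
      refine ⟨es, v', ?_, hmemiff, hsz, hnd, ?_, ?_⟩
      · simpa [pvAdd, hc] using heq
      · exact fun x hx => ⟨List.mem_cons_of_mem _ (hmem x hx).1, (hmem x hx).2⟩
      · intro u hu
        rcases List.mem_cons.mp hu with rfl | hu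
        · exact (hmemiff u).mpr (Or.inl hm)
        · exact hall u hu
    · have hc : ¬ v.contains t = true := by
        rw [Std.HashSet.contains_iff_mem]
        exact hm
      have hstep : pvAdd (back, v) t = (t :: back, v.insert t) := by
        simp [pvAdd, hc]
      obtain ⟨es, v', heq, hmemiff, hsz, hnd, hmem, hall⟩ := ih (t :: back) (v.insert t)
      refine ⟨t :: es, v', ?_, ?_, ?_, ?_, ?_, ?_⟩
      · rw [List.foldl_cons, hstep, heq]
        simp
      · intro x
        rw [hmemiff x, hs_mem_insert]
        simp only [List.mem_cons]
        tauto
      · rw [hsz, Std.HashSet.size_insert, if_neg hm, List.length_cons]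
        omega
      · refine List.nodup_cons.mpr ⟨fun hte => ?_, hnd⟩
        exact (hmem t hte).2 ((hs_mem_insert v t t).mpr (Or.inl rfl))
      · intro x hx
        rcases List.mem_cons.mp hx with rfl | hx
        · exact ⟨List.mem_cons_self .., hm⟩
        · obtain ⟨h1, h2⟩ := hmem x hx
          exact ⟨List.mem_cons_of_mem _ h1, fun hxv => h2 ((hs_mem_insert v x t).mpr (Or.inr hxv))⟩
      · intro u hu
        rcases List.mem_cons.mp hu with rfl | hu
        · exact (hmemiff u).mpr (Or.inl ((hs_mem_insert v u u).mpr (Or.inl rfl)))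
        · exact hall u hu

lemma pvCount (total : Int) (h0 : 0 ≤ total) (v : List (Int × Int × Int)) (hnd : v.Nodup)
    (hok : ∀ s ∈ v, pvOkay total s) : v.length ≤ (total.toNat + 1) ^ 2 := by
  classical
  set f : (Int × Int × Int) → Nat × Nat := fun s => (s.1.toNat, s.2.1.toNat) with hf
  have hinj : ∀ x ∈ v, ∀ y ∈ v, f x = f y → x = y := by
    intro x hx y hy hxy
    obtain ⟨hx12, hx23, hx1, hxs⟩ := hok x hx
    obtain ⟨hy12, hy23, hy1, hys⟩ := hok y hy
    simp only [hf, Prod.mk.injEq] at hxy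
    have e1 : x.1 = y.1 := by omega
    have e2 : x.2.1 = y.2.1 := by omega
    have e3 : x.2.2 = y.2.2 := by omega
    exact Prod.ext e1 (Prod.ext e2 e3)
  have hnd2 : (v.map f).Nodup := hnd.map_on hinj
  have hsub : (v.map f).toFinset ⊆
      Finset.range (total.toNat + 1) ×ˢ Finset.range (total.toNat + 1) := by
    intro p hp
    rw [List.mem_toFinset, List.mem_map] at hp
    obtain ⟨s, hs, rfl⟩ := hp
    obtain ⟨h12, h23, h1, hsum⟩ := hok s hs
    simp only [Finset.mem_product, Finset.mem_range, hf]
    omega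
  have := Finset.card_le_card hsub
  rw [List.toFinset_card_of_nodup hnd2] at this
  simpa [sq, Finset.card_product] using this

lemma pvCountH (total : Int) (h0 : 0 ≤ total) (v : Std.HashSet (Int × Int × Int))
    (hok : ∀ s ∈ v, pvOkay total s) : v.size ≤ (total.toNat + 1) ^ 2 := by
  rw [← Std.HashSet.length_toList]
  exact pvCount total h0 v.toList (hs_nodup_toList v)
    (fun s hs => hok s (Std.HashSet.mem_toList.mp hs))

lemma pvBfs_zero_queue (total : Int) (init : Int × Int × Int)
    (fuel : Nat) (v : Std.HashSet (Int × Int × Int)) (hinv : pvInvA total init [] v) :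
    ((∃ s, pvReach total init s ∧ pvIsEq s) → pvBfs total fuel [] [] v = 1) ∧
    ((¬ ∃ s, pvReach total init s ∧ pvIsEq s) → pvBfs total fuel [] [] v = 0) := by
  obtain ⟨hin, hqv, hre, hok, hproc⟩ := hinv
  have hval : pvBfs total fuel [] [] v = 0 := by cases fuel <;> simp [pvBfs]
  refine ⟨?_, fun _ => hval⟩
  rintro ⟨s, hs, he⟩
  exfalso
  have hsv : s ∈ v :=
    reach_closed total init (fun x => x ∈ v) hin
      (fun u hu => (hproc u hu (by simp)).2) s hs
  exact (hproc s hsv (by simp)).1 he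

lemma pvBfs_main (total : Int) (init : Int × Int × Int) (h0 : 0 ≤ total) :
    ∀ (fuel : Nat) (front back : List (Int × Int × Int))
      (v : Std.HashSet (Int × Int × Int)), pvInvA total init (front ++ back.reverse) v →
    2 * ((total.toNat + 1) ^ 2 - v.size) + front.length + 2 * back.length ≤ fuel →
    ((∃ s, pvReach total init s ∧ pvIsEq s) → pvBfs total fuel front back v = 1) ∧
    ((¬ ∃ s, pvReach total init s ∧ pvIsEq s) → pvBfs total fuel front back v = 0) := by
  intro fuel
  induction fuel with
  | zero =>
    intro front back v hinv hfuel
    have hfb : front = [] ∧ back = [] := by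
      constructor
      · cases front with
        | nil => rfl
        | cons s fs => simp at hfuel
      · cases back with
        | nil => rfl
        | cons s bs => simp at hfuel
    obtain ⟨rfl, rfl⟩ := hfb
    exact pvBfs_zero_queue total init 0 v (by simpa using hinv)
  | succ f ih =>
    intro front back v hinv hfuel
    cases front with
    | nil =>
      cases back with
      | nil => exact pvBfs_zero_queue total init (f + 1) v (by simpa using hinv)
      | cons b bs =>
        have hred : pvBfs total (f + 1) [] (b :: bs) v =
            pvBfs total f (b :: bs).reverse [] v := rfl
        rw [hred]
        apply ih (b :: bs).reverse [] v
        · simpa using hinv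
        · simp only [List.length_reverse, List.length_cons, List.length_nil] at hfuel ⊢
          omega
    | cons s fs =>
      obtain ⟨hin, hqv, hre, hok, hproc⟩ := hinv
      have hsv : s ∈ v := hqv s (by simp)
      by_cases he : s.1 = s.2.1 ∧ s.2.1 = s.2.2
      · have hval : pvBfs total (f + 1) (s :: fs) back v = 1 := by simp [pvBfs, he]
        refine ⟨fun _ => hval, fun hno => absurd ⟨s, hre s hsv, he⟩ hno⟩
      · obtain ⟨es, v', heq, hmemiff, hsz, hndes, hmem, hall⟩ :=
          foldl_pvAdd_spec (pvNxt total s) back v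
        have hok' : ∀ u ∈ v', pvOkay total u := by
          intro u hu
          rcases (hmemiff u).mp hu with hu | hu
          · exact hok u hu
          · exact pvNxt_okay total s (hok s hsv) u (hmem u hu).1
        have hinv' : pvInvA total init (fs ++ (es.reverse ++ back).reverse) v' := by
          have hQ : fs ++ (es.reverse ++ back).reverse = (fs ++ back.reverse) ++ es := by
            simp [List.reverse_append]
          rw [hQ]
          refine ⟨(hmemiff init).mpr (Or.inl hin), ?_, ?_, hok', ?_⟩
          · intro u hu
            rcases List.mem_append.mp hu with hu | hu
            · exact (hmemiff u).mpr (Or.inl (hqv u (by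
                rcases List.mem_append.mp hu with hu | hu
                · exact List.mem_cons_of_mem _ (List.mem_append_left _ hu)
                · exact List.mem_cons_of_mem _ (List.mem_append_right _ hu))))
            · exact (hmemiff u).mpr (Or.inr hu)
          · intro u hu
            rcases (hmemiff u).mp hu with hu | hu
            · exact hre u hu
            · exact Relation.ReflTransGen.tail (hre s hsv) (hmem u hu).1
          · intro u hu hnq
            rcases (hmemiff u).mp hu with hu | hu
            · by_cases hus : u = s
              · subst hus
                refine ⟨he, fun t ht => ?_⟩
                exact (hmemiff t).mpr (by
                  by_cases htv : t ∈ v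
                  · exact Or.inl htv
                  · right
                    by_contra hte
                    exact htv (by
                      have := hall t ht
                      rcases (hmemiff t).mp this with h | h
                      · exact h
                      · exact absurd h hte))
              · have hold := hproc u hu (by
                  intro hmemq
                  rcases List.mem_append.mp hmemq with hmemq | hmemq
                  · rcases List.mem_cons.mp hmemq with rfl | hmemq
                    · exact hus rfl
                    · exact hnq (List.mem_append_left _ (List.mem_append_left _ hmemq))
                  · exact hnq (List.mem_append_left _ (List.mem_append_right _ hmemq)))
                exact ⟨hold.1, fun t ht => (hmemiff t).mpr (Or.inl (hold.2 t ht))⟩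
            · exact absurd (List.mem_append_right _ hu) hnq
        have hlen : v'.size ≤ (total.toNat + 1) ^ 2 := pvCountH total h0 v' hok'
        have hfuel' : 2 * ((total.toNat + 1) ^ 2 - v'.size) + fs.length +
            2 * (es.reverse ++ back).length ≤ f := by
          simp only [List.length_append, List.length_cons, List.length_reverse] at hfuel hlen ⊢
          rw [hsz] at hlen ⊢
          generalize hNN : (total.toNat + 1) ^ 2 = N at hfuel hlen ⊢
          omega
        have hres := ih fs (es.reverse ++ back) v' hinv' hfuel'
        have hred : pvBfs total (f + 1) (s :: fs) back v =
            pvBfs total f fs (es.reverse ++ back) v' := by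
          rw [pvBfs, if_neg he, heq]
        rw [hred]
        exact hres

lemma pvBack_empty_stack (total : Int) (tgt initial : Int × Int × Int)
    (fuel : Nat) (seen : Std.HashSet (Int × Int × Int))
    (hinv : pvInvB total tgt initial [] seen) :
    (pvBReach tgt initial → pvBack initial fuel [] seen = 1) ∧
    (¬ pvBReach tgt initial → pvBack initial fuel [] seen = 0) := by
  obtain ⟨hin, hsk, hre, hok, hproc⟩ := hinv
  have hval : pvBack initial fuel [] seen = 0 := by cases fuel <;> simp [pvBack]
  refine ⟨?_, fun _ => hval⟩
  intro hr
  exfalso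
  have hiv : initial ∈ seen :=
    breach_closed tgt (fun x => x ∈ seen) hin
      (fun u hu => (hproc u hu (by simp)).2) initial hr
  exact (hproc initial hiv (by simp)).1 rfl

lemma pvBack_main (total : Int) (tgt initial : Int × Int × Int) (h0 : 0 ≤ total) :
    ∀ (fuel : Nat) (stack : List (Int × Int × Int))
      (seen : Std.HashSet (Int × Int × Int)), pvInvB total tgt initial stack seen →
    ((total.toNat + 1) ^ 2 - seen.size) + stack.length ≤ fuel →
    (pvBReach tgt initial → pvBack initial fuel stack seen = 1) ∧
    (¬ pvBReach tgt initial → pvBack initial fuel stack seen = 0) := by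
  intro fuel
  induction fuel with
  | zero =>
    intro stack seen hinv hfuel
    have hst : stack = [] := by
      cases stack with
      | nil => rfl
      | cons s rest => simp at hfuel
    subst hst
    exact pvBack_empty_stack total tgt initial 0 seen hinv
  | succ f ih =>
    intro stack seen hinv hfuel
    cases stack with
    | nil => exact pvBack_empty_stack total tgt initial (f + 1) seen hinv
    | cons s rest =>
      obtain ⟨hin, hsk, hre, hok, hproc⟩ := hinv
      have hsv : s ∈ seen := hsk s (by simp)
      by_cases hsi : s = initial
      · subst hsi
        have hval : pvBack s (f + 1) (s :: rest) seen = 1 := by simp [pvBack]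
        exact ⟨fun _ => hval, fun hno => absurd (hre s hsv) hno⟩
      · obtain ⟨es, seen', heq, hmemiff, hsz, hndes, hmem, hall⟩ :=
          foldl_pvAdd_spec (pvHalfMoves s) rest seen
        have hok' : ∀ u ∈ seen', pvOkay total u := by
          intro u hu
          rcases (hmemiff u).mp hu with hu | hu
          · exact hok u hu
          · exact pvHalf_okay total s (hok s hsv) u (hmem u hu).1
        have hinv' : pvInvB total tgt initial (es.reverse ++ rest) seen' := by
          refine ⟨(hmemiff tgt).mpr (Or.inl hin), ?_, ?_, hok', ?_⟩
          · intro u hu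
            rcases List.mem_append.mp hu with hu | hu
            · exact (hmemiff u).mpr (Or.inr (List.mem_reverse.mp hu))
            · exact (hmemiff u).mpr (Or.inl (hsk u (List.mem_cons_of_mem _ hu)))
          · intro u hu
            rcases (hmemiff u).mp hu with hu | hu
            · exact hre u hu
            · exact Relation.ReflTransGen.tail (hre s hsv) (hmem u hu).1
          · intro u hu hns
            rcases (hmemiff u).mp hu with hu | hu
            · by_cases hus : u = s
              · subst hus
                refine ⟨hsi, fun t ht => ?_⟩
                exact hall t ht
              · have hold := hproc u hu (by
                  intro hmemq
                  rcases List.mem_cons.mp hmemq with rfl | hmemq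
                  · exact hus rfl
                  · exact hns (List.mem_append_right _ hmemq))
                exact ⟨hold.1, fun t ht => (hmemiff t).mpr (Or.inl (hold.2 t ht))⟩
            · exact absurd (List.mem_append_left _ (List.mem_reverse.mpr hu)) hns
        have hlen : seen'.size ≤ (total.toNat + 1) ^ 2 := pvCountH total h0 seen' hok'
        have hfuel' : ((total.toNat + 1) ^ 2 - seen'.size) +
            (es.reverse ++ rest).length ≤ f := by
          simp only [List.length_append, List.length_cons, List.length_reverse] at hfuel hlen ⊢
          rw [hsz] at hlen ⊢
          generalize hNN : (total.toNat + 1) ^ 2 = N at hfuel hlen ⊢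
          omega
        have hred : pvBack initial (f + 1) (s :: rest) seen =
            pvBack initial f (es.reverse ++ rest) seen' := by
          rw [pvBack, if_neg hsi, heq]
        rw [hred]
        exact ih (es.reverse ++ rest) seen' hinv' hfuel'

-- A forward derivation from an okay start is, read backwards, a halving derivation
lemma fwd_to_bwd (total : Int) (init : Int × Int × Int) (h0 : pvOkay total init) :
    ∀ x, pvReach total init x → pvBReach x init := by
  intro x h
  induction h with
  | refl => exact Relation.ReflTransGen.refl
  | tail hr hstep ih =>
    rename_i y z
    have hoky : pvOkay total y := pvReach_okay total init y h0 hr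
    exact Relation.ReflTransGen.head (step_fwd_bwd total y z hoky hstep) ih

-- and conversely, a halving derivation from an okay target reverses to a forward one
lemma bwd_to_fwd (total : Int) (tgt : Int × Int × Int) (h0 : pvOkay total tgt) :
    ∀ x, pvBReach tgt x → pvOkay total x ∧ pvReach total x tgt := by
  intro x h
  induction h with
  | refl => exact ⟨h0, Relation.ReflTransGen.refl⟩
  | tail hr hstep ih =>
    rename_i y z
    have hokz : pvOkay total z := pvHalf_okay total y ih.1 z hstep
    exact ⟨hokz, Relation.ReflTransGen.head (step_bwd_fwd total y z ih.1 hstep) ih.2⟩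

-- A's reachable-equal test equals reaching the exact equal triple, under the okay invariant
lemma key_equal (total T : Int) (init : Int × Int × Int) (hok0 : pvOkay total init)
    (hT : 3 * T = total) :
    (∃ s, pvReach total init s ∧ pvIsEq s) ↔ pvReach total init (T, T, T) := by
  constructor
  · rintro ⟨s, hs, h1, h2⟩
    obtain ⟨-, -, -, hsum⟩ := pvReach_okay total init s hok0 hs
    have e1 : s.1 = T := by omega
    have e2 : s.2.1 = T := by omega
    have e3 : s.2.2 = T := by omega
    have hsT : s = (T, T, T) := Prod.ext e1 (Prod.ext e2 e3)
    exact hsT ▸ hs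
  · intro h
    exact ⟨(T, T, T), h, rfl, rfl⟩

lemma pvBfs_succ_one (total : Int) (f : Nat) (s : Int × Int × Int)
    (front back : List (Int × Int × Int)) (vis : Std.HashSet (Int × Int × Int))
    (h1 : s.1 = s.2.1) (h2 : s.2.1 = s.2.2) :
    pvBfs total (f + 1) (s :: front) back vis = 1 := by
  simp [pvBfs, h1, h2]

lemma pvBack_succ_self (initial : Int × Int × Int) (f : Nat)
    (rest : List (Int × Int × Int)) (seen : Std.HashSet (Int × Int × Int)) :
    pvBack initial (f + 1) (initial :: rest) seen = 1 := by
  simp [pvBack]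

theorem final_eq (a b c : Int)
    (hpre : PySem.Int.mod (a + b + c) 3 ≠ 0 ∨ (0 ≤ a ∧ 0 ≤ b ∧ 0 ≤ c) ∨ (a = b ∧ b = c)) :
    move_equals a b c = move_equals_alt a b c := by
  by_cases hm : PySem.Int.mod (a + b + c) 3 = 0
  case neg =>
    have hnd3 : ¬ (3 : Int) ∣ (a + b + c) :=
      fun h => hm ((PySem.Int.mod_eq_zero_iff_dvd _ _).mpr h)
    simp [move_equals, move_equals_alt, hnd3]
  have hmne : ¬ PySem.Int.mod (a + b + c) 3 ≠ 0 := not_not_intro hm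
  have hdvd : (3 : Int) ∣ (a + b + c) := (PySem.Int.mod_eq_zero_iff_dvd _ _).mp hm
  set T := PySem.Int.floordiv (a + b + c) 3 with hTdef
  have hT : 3 * T = a + b + c := by
    rw [hTdef, PySem.Int.floordiv_eq_ediv_of_pos (by norm_num)]
    exact Int.mul_ediv_cancel' hdvd
  have hA : move_equals a b c =
      pvBfs (a + b + c) (2 * (((a + b + c).toNat + 1) ^ 2) + 2) [sort3 a b c] []
        ((∅ : Std.HashSet (Int × Int × Int)).insert (sort3 a b c)) := by
    rw [move_equals]
    simp only [if_neg hmne]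
  have hB : move_equals_alt a b c =
      pvBack (sort3 a b c) (((a + b + c).toNat + 1) ^ 2 + 2) [(T, T, T)]
        ((∅ : Std.HashSet (Int × Int × Int)).insert (T, T, T)) := by
    rw [move_equals_alt]
    simp only [if_neg hmne]
    rw [← hTdef]
  rcases hpre with hpre | ⟨ha, hb, hc⟩ | ⟨hab, hbc⟩
  · exact absurd hm hpre
  · -- main case: nonnegative piles
    have h0 : (0 : Int) ≤ a + b + c := by omega
    have hT0 : 0 ≤ T := by omega
    have hok0 : pvOkay (a + b + c) (sort3 a b c) := sort3_okay _ a b c ha hb hc rfl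
    have hokT : pvOkay (a + b + c) (T, T, T) := by
      refine ⟨le_refl _, le_refl _, hT0, by simp only []; omega⟩
    have hNge : 1 ≤ ((a + b + c).toNat + 1) ^ 2 := Nat.one_le_pow _ _ (by omega)
    have hmemA : ∀ x, x ∈ ((∅ : Std.HashSet (Int × Int × Int)).insert (sort3 a b c)) ↔
        x = sort3 a b c := by
      intro x
      rw [hs_mem_insert]
      simp
    have hszA : ((∅ : Std.HashSet (Int × Int × Int)).insert (sort3 a b c)).size = 1 := by
      rw [Std.HashSet.size_insert, if_neg (by simp)]
      rfl
    have hmemB : ∀ x, x ∈ ((∅ : Std.HashSet (Int × Int × Int)).insert (T, T, T)) ↔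
        x = (T, T, T) := by
      intro x
      rw [hs_mem_insert]
      simp
    have hszB : ((∅ : Std.HashSet (Int × Int × Int)).insert (T, T, T)).size = 1 := by
      rw [Std.HashSet.size_insert, if_neg (by simp)]
      rfl
    have hinvA : pvInvA (a + b + c) (sort3 a b c) ([sort3 a b c] ++ List.reverse [])
        ((∅ : Std.HashSet (Int × Int × Int)).insert (sort3 a b c)) := by
      refine ⟨(hmemA _).mpr rfl, ?_, ?_, ?_, ?_⟩
      · intro s hs
        simp only [List.reverse_nil, List.append_nil, List.mem_singleton] at hs
        subst hs
        exact (hmemA _).mpr rfl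
      · intro s hs
        rw [hmemA] at hs
        subst hs
        exact Relation.ReflTransGen.refl
      · intro s hs
        rw [hmemA] at hs
        subst hs
        exact hok0
      · intro s hs hns
        rw [hmemA] at hs
        subst hs
        exact absurd (by simp) hns
    have hinvB : pvInvB (a + b + c) (T, T, T) (sort3 a b c) [(T, T, T)]
        ((∅ : Std.HashSet (Int × Int × Int)).insert (T, T, T)) := by
      refine ⟨(hmemB _).mpr rfl, ?_, ?_, ?_, ?_⟩
      · intro s hs
        simp only [List.mem_singleton] at hs
        subst hs
        exact (hmemB _).mpr rfl
      · intro s hs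
        rw [hmemB] at hs
        subst hs
        exact Relation.ReflTransGen.refl
      · intro s hs
        rw [hmemB] at hs
        subst hs
        exact hokT
      · intro s hs hns
        rw [hmemB] at hs
        subst hs
        exact absurd (by simp) hns
    have hAres := pvBfs_main (a + b + c) (sort3 a b c) h0
        (2 * (((a + b + c).toNat + 1) ^ 2) + 2) [sort3 a b c] []
        ((∅ : Std.HashSet (Int × Int × Int)).insert (sort3 a b c)) hinvA (by
          rw [hszA]
          simp only [List.length_cons, List.length_nil]
          generalize ((a + b + c).toNat + 1) ^ 2 = N at hNge ⊢
          omega)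
    have hBres := pvBack_main (a + b + c) (T, T, T) (sort3 a b c) h0
        ((((a + b + c).toNat + 1) ^ 2) + 2) [(T, T, T)]
        ((∅ : Std.HashSet (Int × Int × Int)).insert (T, T, T)) hinvB (by
          rw [hszB]
          simp only [List.length_cons, List.length_nil]
          generalize ((a + b + c).toNat + 1) ^ 2 = N at hNge ⊢
          omega)
    have hkey := key_equal (a + b + c) T (sort3 a b c) hok0 hT
    have hiff : (∃ s, pvReach (a + b + c) (sort3 a b c) s ∧ pvIsEq s) ↔
        pvBReach (T, T, T) (sort3 a b c) := by
      rw [hkey]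
      constructor
      · intro h
        exact fwd_to_bwd (a + b + c) (sort3 a b c) hok0 (T, T, T) h
      · intro h
        exact (bwd_to_fwd (a + b + c) (T, T, T) hokT (sort3 a b c) h).2
    rw [hA, hB]
    by_cases hr : pvBReach (T, T, T) (sort3 a b c)
    · rw [hAres.1 (hiff.mpr hr), hBres.1 hr]
    · rw [hAres.2 (fun h => hr (hiff.mp h)), hBres.2 hr]
  · -- already-equal case (any sign): both sides return 1 immediately
    subst hab
    subst hbc
    have hinit : sort3 a a a = (a, a, a) := by
      rw [sort3_closed]
      refine Prod.ext ?_ (Prod.ext ?_ ?_) <;> simp only [] <;> omega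
    have hTa : T = a := by omega
    rw [hA, hB, hinit, hTa]
    have hAval : pvBfs (a + a + a) (2 * (((a + a + a).toNat + 1) ^ 2) + 2)
        [(a, a, a)] [] ((∅ : Std.HashSet (Int × Int × Int)).insert (a, a, a)) = 1 :=
      pvBfs_succ_one _ (2 * (((a + a + a).toNat + 1) ^ 2) + 1) _ _ _ _ rfl rfl
    have hBval : pvBack (a, a, a) (((a + a + a).toNat + 1) ^ 2 + 2)
        [(a, a, a)] ((∅ : Std.HashSet (Int × Int × Int)).insert (a, a, a)) = 1 :=
      pvBack_succ_self _ (((a + a + a).toNat + 1) ^ 2 + 1) _ _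
    rw [hAval, hBval]

-- ===== VERDICT (by name: the statement is the Claim_ definition above) =====
theorem move_equals_spec : Claim_equal_move_equals := by
  intro a b c _ hpre
  unfold Pre_move_equals at hpre
  unfold Spec_move_equals
  exact final_eq a b c hpre
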